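-- pv_equiv track=rewrite | github.com/FlorianMuljono/powerbi-dashboard-demo | app.py | format_stats_for_prompt
-- ===== SOURCE A (Python) =====
-- def format_stats_for_prompt(stats):
--     if not stats:
--         return "No statistics available."
--
--     formatted = []
--     current_category = None
--
--     for stat in stats:
--         category = stat.get('stat_category', 'general')
--         if category != current_category:
--             current_category = category
--             formatted.append(f"\n## {category.upper()}")
--         formatted.append(f"- {stat.get('stat_name', 'N/A')}: {stat.get('stat_value', 'N/A')}")
--
--     return "\n".join(formatted)
-- ===== SOURCE B (Python) =====
-- def format_stats_for_prompt(stats):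
--     if not stats:
--         return "No statistics available."
--     lines = []
--     i, n = 0, len(stats)
--     while i < n:
--         cat = stats[i].get('stat_category', 'general')
--         j = i
--         while j < n and stats[j].get('stat_category', 'general') == cat:
--             j += 1
--         lines.append("\n## " + cat.upper())
--         for s in stats[i:j]:
--             lines.append("- " + s.get('stat_name', 'N/A') + ": " + s.get('stat_value', 'N/A'))
--         i = j
--     return "\n".join(lines)
-- ===== Notes on version B (the rewrite author's own statement) =====
-- stated objective: alternative
-- what changed: Replaces A's single pass with a mutable current-category sentinel by a nested groupby-style scan: an outer loop finds each maximal run of equal categories and emits its header once, an inner loop formats the run's lines; no category state is carried across iterations.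
import Mathlib
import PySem

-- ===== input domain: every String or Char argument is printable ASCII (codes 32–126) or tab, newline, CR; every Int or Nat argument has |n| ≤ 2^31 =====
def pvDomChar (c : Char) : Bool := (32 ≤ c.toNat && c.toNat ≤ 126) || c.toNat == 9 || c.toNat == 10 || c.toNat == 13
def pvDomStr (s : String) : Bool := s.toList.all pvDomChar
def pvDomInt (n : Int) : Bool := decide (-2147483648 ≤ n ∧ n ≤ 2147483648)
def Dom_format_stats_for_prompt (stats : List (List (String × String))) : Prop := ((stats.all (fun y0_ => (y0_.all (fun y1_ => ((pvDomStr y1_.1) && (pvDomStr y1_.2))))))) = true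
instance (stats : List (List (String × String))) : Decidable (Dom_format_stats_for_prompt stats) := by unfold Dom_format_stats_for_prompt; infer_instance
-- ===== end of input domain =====

-- B replaces A's one-pass loop with a mutable current-category sentinel by a nested
-- run-by-run scan (groupby style); objective: alternative decomposition, same cost.

-- ===== PORT A =====
-- one loop iteration of A: state = (formatted, current_category)
def fspStepA (st : List String × Option String) (stat : List (String × String)) :
    List String × Option String :=
  let category := PySem.Dict.getD ⟨stat⟩ "stat_category" "general"
  let (formatted, current) :=
    if st.2 ≠ some category then
      (st.1 ++ ["\n## " ++ PySem.Str.upper category], some category)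
    else (st.1, st.2)
  (formatted ++ ["- " ++ PySem.Dict.getD ⟨stat⟩ "stat_name" "N/A" ++ ": " ++
                 PySem.Dict.getD ⟨stat⟩ "stat_value" "N/A"], current)

def format_stats_for_prompt (stats : List (List (String × String))) : String :=
  if stats = [] then "No statistics available."
  else PySem.Str.join "\n" (stats.foldl fspStepA ([], none)).1

-- ===== PORT B =====
def fspCat (s : List (String × String)) : String :=
  PySem.Dict.getD ⟨s⟩ "stat_category" "general"

def fspLine (s : List (String × String)) : String :=
  "- " ++ PySem.Dict.getD ⟨s⟩ "stat_name" "N/A" ++ ": " ++ PySem.Dict.getD ⟨s⟩ "stat_value" "N/A"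

-- outer while-loop of B: take one maximal run of equal categories, emit header + lines, recurse
def fspGroups : List (List (String × String)) → List String
  | [] => []
  | s :: rest =>
    ("\n## " ++ PySem.Str.upper (fspCat s))
      :: ((s :: rest).takeWhile (fun t => fspCat t = fspCat s)).map fspLine
      ++ fspGroups ((s :: rest).dropWhile (fun t => fspCat t = fspCat s))
termination_by l => l.length
decreasing_by
  simp only [List.dropWhile_cons, decide_eq_true_eq]
  exact Nat.lt_succ_of_le (List.length_dropWhile_le _ _)

def format_stats_for_prompt_alt (stats : List (List (String × String))) : String :=
  if stats = [] then "No statistics available."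
  else PySem.Str.join "\n" (fspGroups stats)

-- ===== PRECONDITION & SPEC =====
def Spec_format_stats_for_prompt (stats : List (List (String × String))) (out : String) : Prop := out = format_stats_for_prompt_alt stats
instance (stats : List (List (String × String))) (out : String) : Decidable (Spec_format_stats_for_prompt stats out) := by unfold Spec_format_stats_for_prompt; infer_instance

-- ===== CLAIM (what is proved, stated in full; the proofs are below) =====
def Claim_equal_format_stats_for_prompt : Prop := ∀ (stats : List (List (String × String))), Dom_format_stats_for_prompt stats → Spec_format_stats_for_prompt stats (format_stats_for_prompt stats)

-- ===== LEMMAS AND PROOFS =====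

-- the lines A's loop produces once some category c is current
def fspBody (c : String) : List (List (String × String)) → List String
  | [] => []
  | s :: rest =>
    if fspCat s = c then fspLine s :: fspBody c rest
    else ("\n## " ++ PySem.Str.upper (fspCat s)) :: fspLine s :: fspBody (fspCat s) rest

theorem fspStepA_some (st : List String) (c : String) (stat : List (String × String)) :
    fspStepA (st, some c) stat =
      if fspCat stat = c then (st ++ [fspLine stat], some c)
      else (st ++ ["\n## " ++ PySem.Str.upper (fspCat stat), fspLine stat], some (fspCat stat)) := by
  by_cases h : fspCat stat = c
  · subst h; simp [fspStepA, fspCat, fspLine]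
  · simp only [fspStepA, fspCat, fspLine] at *
    rw [if_neg h, if_pos (by simpa [eq_comm] using h)]
    simp

theorem fspFoldA (l : List (List (String × String))) :
    ∀ (acc : List String) (c : String),
      (l.foldl fspStepA (acc, some c)).1 = acc ++ fspBody c l := by
  induction l with
  | nil => simp [fspBody]
  | cons s rest ih =>
    intro acc c
    by_cases h : fspCat s = c
    · simp [List.foldl_cons, fspStepA_some, h, fspBody, ih]
    · simp [List.foldl_cons, fspStepA_some, h, fspBody, ih]

theorem fspBody_eq (l : List (List (String × String))) :
    ∀ c, fspBody c l =
      (l.takeWhile (fun t => fspCat t = c)).map fspLine ++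
      fspGroups (l.dropWhile (fun t => fspCat t = c)) := by
  induction l with
  | nil => intro c; simp [fspBody, fspGroups]
  | cons s rest ih =>
    intro c
    by_cases h : fspCat s = c
    · simp [fspBody, h, ih]
    · simp only [fspBody, List.takeWhile_cons, List.dropWhile_cons,
        decide_eq_true_eq, if_neg h, List.map_nil, List.nil_append]
      rw [fspGroups]
      simp [ih]

-- ===== VERDICT (by name: the statement is the Claim_ definition above) =====
theorem format_stats_for_prompt_spec : Claim_equal_format_stats_for_prompt := by
  intro stats _
  unfold Spec_format_stats_for_prompt format_stats_for_prompt format_stats_for_prompt_alt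
  cases stats with
  | nil => simp
  | cons s rest =>
    simp only [reduceCtorEq, if_false]
    congr 1
    rw [List.foldl_cons]
    have h0 : fspStepA ([], none) s =
        (["\n## " ++ PySem.Str.upper (fspCat s), fspLine s], some (fspCat s)) := by
      simp [fspStepA, fspCat, fspLine]
    rw [h0, fspFoldA, fspBody_eq, fspGroups]
    simp
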